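-- pv_equiv track=rewrite | github.com/hemh02/Chimera | src/dataset.py | slide_window_bidirectional
-- ===== SOURCE A (Python) =====
-- def slide_window_bidirectional(src, window_size):
--     res_src = []
--     res_label = []
--     for i in range(len(src) - window_size):
--         window = []
--         bi_window = []
--         for j in range(window_size): window.append(src[i + j])
--         for j in range(window_size): bi_window.append(src[len(src) - i - j - 1])
--         res_src.append(window)
--         res_src.append(bi_window)
--         res_label.append(src[i + window_size])
--         res_label.append(src[len(src) - i - window_size - 1])
--     return res_src, res_label
-- ===== SOURCE B (Python) =====
-- def slide_window_bidirectional(src, window_size):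
--     rev = list(reversed(src))
--     res_src = []
--     res_label = []
--     for i in range(len(src) - window_size):
--         res_src.append(list(src[i:i + window_size]))
--         res_src.append(rev[i:i + window_size])
--         res_label.append(src[i + window_size])
--         res_label.append(rev[i + window_size])
--     return res_src, res_label
-- ===== Notes on version B (the rewrite author's own statement) =====
-- stated objective: simpler
-- what changed: B builds one reversed copy of src and takes forward slices of src and rev instead of A's per-window inner index loops with backward len(src)-i-j-1 arithmetic.
import Mathlib
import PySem

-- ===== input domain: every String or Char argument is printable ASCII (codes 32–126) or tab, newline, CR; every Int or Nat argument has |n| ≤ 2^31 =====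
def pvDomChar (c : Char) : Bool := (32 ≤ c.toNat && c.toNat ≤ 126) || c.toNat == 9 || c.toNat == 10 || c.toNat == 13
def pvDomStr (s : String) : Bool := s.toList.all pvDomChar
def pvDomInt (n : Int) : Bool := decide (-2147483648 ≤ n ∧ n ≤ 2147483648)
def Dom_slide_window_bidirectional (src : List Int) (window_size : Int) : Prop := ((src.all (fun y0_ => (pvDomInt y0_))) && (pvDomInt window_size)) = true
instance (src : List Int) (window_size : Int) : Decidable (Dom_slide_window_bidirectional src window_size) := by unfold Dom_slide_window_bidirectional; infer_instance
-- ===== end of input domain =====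

-- B replaces A's per-window inner index loops (with backward len-i-j-1 arithmetic) by one
-- reversed copy of src and plain forward slices of src and rev; objective: simpler.

-- ===== PORT A =====
def slide_window_bidirectional (src : List Int) (window_size : Int) : List (List Int) × List Int :=
  (PySem.List.pyRange 0 ((src.length : Int) - window_size) 1).foldl
    (fun acc i =>
      let window := (PySem.List.pyRange 0 window_size 1).foldl
        (fun w j => w ++ [PySem.List.pyGetD src (i + j) 0]) []
      let bi_window := (PySem.List.pyRange 0 window_size 1).foldl
        (fun w j => w ++ [PySem.List.pyGetD src ((src.length : Int) - i - j - 1) 0]) []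
      (acc.1 ++ [window] ++ [bi_window],
       acc.2 ++ [PySem.List.pyGetD src (i + window_size) 0]
             ++ [PySem.List.pyGetD src ((src.length : Int) - i - window_size - 1) 0]))
    ([], [])

-- ===== PORT B =====
def slide_window_bidirectional_alt (src : List Int) (window_size : Int) : List (List Int) × List Int :=
  let rev := src.reverse
  (PySem.List.pyRange 0 ((src.length : Int) - window_size) 1).foldl
    (fun acc i =>
      (acc.1 ++ [PySem.List.slice src (some i) (some (i + window_size))]
            ++ [PySem.List.slice rev (some i) (some (i + window_size))],
       acc.2 ++ [PySem.List.pyGetD src (i + window_size) 0]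
             ++ [PySem.List.pyGetD rev (i + window_size) 0]))
    ([], [])

-- ===== PRECONDITION & SPEC =====
-- A raises IndexError for every window_size < 0 (src[len(src)-0-window_size-1] at i=0 is past the end).
def Pre_slide_window_bidirectional (src : List Int) (window_size : Int) : Prop := 0 ≤ window_size
instance (src : List Int) (window_size : Int) : Decidable (Pre_slide_window_bidirectional src window_size) := by unfold Pre_slide_window_bidirectional; infer_instance
def pvWitness_slide_window_bidirectional : List Int × Int := ([1, 2, 3], 1)

def Spec_slide_window_bidirectional (src : List Int) (window_size : Int) (out : List (List Int) × List Int) : Prop := out = slide_window_bidirectional_alt src window_size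
instance (src : List Int) (window_size : Int) (out : List (List Int) × List Int) : Decidable (Spec_slide_window_bidirectional src window_size out) := by unfold Spec_slide_window_bidirectional; infer_instance

-- ===== CLAIM (what is proved, stated in full; the proofs are below) =====
def Claim_equal_slide_window_bidirectional : Prop := ∀ (src : List Int) (window_size : Int), Dom_slide_window_bidirectional src window_size → Pre_slide_window_bidirectional src window_size → Spec_slide_window_bidirectional src window_size (slide_window_bidirectional src window_size)
-- ===== LEMMAS AND PROOFS =====

-- element of the reversed list, by backward index into the original
theorem pv_getD_reverse (src : List Int) (k : Int) (h0 : 0 ≤ k) (h1 : k < (src.length : Int)) :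
    PySem.List.pyGetD src.reverse k 0 = PySem.List.pyGetD src ((src.length : Int) - 1 - k) 0 := by
  rw [PySem.List.pyGetD_eq_getElem _ _ h0 (by simpa using h1),
      PySem.List.pyGetD_eq_getElem _ _ (by omega) (by omega)]
  rw [List.getElem_reverse]
  congr 1
  omega

-- a window built by indexing over range(k) starting at a is the slice xs[a:a+k]
theorem pv_map_range_eq_slice (src : List Int) (a k : Int) (h0 : 0 ≤ a) (hk : 0 ≤ k)
    (h1 : a + k ≤ (src.length : Int)) :
    (PySem.List.pyRange 0 k 1).map (fun j => PySem.List.pyGetD src (a + j) 0)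
      = PySem.List.slice src (some a) (some (a + k)) := by
  rw [PySem.List.slice_toNat _ h0 (by omega)]
  apply List.ext_getElem
  · simp [PySem.List.length_pyRange_one]
    omega
  · intro m hm1 hm2
    have hmk : (m : Int) < k := by
      have := hm1
      simp [PySem.List.length_pyRange_one] at this
      omega
    simp only [List.getElem_map, PySem.List.getElem_pyRange_one]
    rw [PySem.List.pyGetD_eq_getElem _ _ (by omega) (by omega)]
    rw [List.getElem_take, List.getElem_drop]
    congr 1
    omega

-- ===== VERDICT (by name: the statement is the Claim_ definition above) =====
theorem slide_window_bidirectional_spec : Claim_equal_slide_window_bidirectional := by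
  intro src ws _ hpre
  unfold Spec_slide_window_bidirectional
  unfold slide_window_bidirectional slide_window_bidirectional_alt
  apply PySem.List.foldl_congr_mem
  intro acc i hi
  dsimp only
  obtain ⟨hi0, hi1⟩ := (PySem.List.mem_pyRange_one).1 hi
  have hws : (0 : Int) ≤ ws := hpre
  have hrevlen : (src.reverse.length : Int) = (src.length : Int) := by simp
  simp only [PySem.List.foldl_append_singleton_eq_map, List.nil_append]
  have hwin : (PySem.List.pyRange 0 ws 1).map (fun j => PySem.List.pyGetD src (i + j) 0)
      = PySem.List.slice src (some i) (some (i + ws)) :=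
    pv_map_range_eq_slice src i ws hi0 hws (by omega)
  have hbi : (PySem.List.pyRange 0 ws 1).map
        (fun j => PySem.List.pyGetD src ((src.length : Int) - i - j - 1) 0)
      = PySem.List.slice src.reverse (some i) (some (i + ws)) := by
    rw [← pv_map_range_eq_slice src.reverse i ws hi0 hws (by rw [List.length_reverse]; omega)]
    apply List.map_congr_left
    intro j hj
    obtain ⟨hj0, hj1⟩ := (PySem.List.mem_pyRange_one).1 hj
    rw [pv_getD_reverse src (i + j) (by omega) (by omega)]
    congr 1
    omega
  have hlab : PySem.List.pyGetD src ((src.length : Int) - i - ws - 1) 0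
      = PySem.List.pyGetD src.reverse (i + ws) 0 := by
    rw [pv_getD_reverse src (i + ws) (by omega) (by omega)]
    congr 1
    omega
  rw [hwin, hbi, hlab]
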